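-- pv_equiv track=rewrite | github.com/Tientjie-san/AoC | 2015/Python/day1.py | part2
-- ===== SOURCE A (Python) =====
-- from typing import List
--
-- def part2(input: List[str]) -> int:
--     floor = 0
--     count = 0
--     for line in input:
--         for char in line:
--             count += 1
--             if char == "(":
--                 floor += 1
--             else:
--                 floor -= 1
--
--             if floor == -1:
--                 return count
--
--     return count
-- ===== SOURCE B (Python) =====
-- from typing import List
--
-- def part2(input: List[str]) -> int:
--     # Two-pass: build the full table of running floor values over the
--     # flattened characters, then search it for the first -1.
--     chars = "".join(input)
--     floors = []
--     f = 0
--     for c in chars: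
--         f += 1 if c == "(" else -1
--         floors.append(f)
--     try:
--         return floors.index(-1) + 1
--     except ValueError:
--         return len(chars)
-- ===== Notes on version B (the rewrite author's own statement) =====
-- stated objective: alternative
-- what changed: Replaces the interleaved accumulate-and-early-return nested loop by two separate passes: flatten the lines, materialise the whole prefix-sum table of floor values, then find the first -1 with list.index (falling back to the total character count).
import Mathlib
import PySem

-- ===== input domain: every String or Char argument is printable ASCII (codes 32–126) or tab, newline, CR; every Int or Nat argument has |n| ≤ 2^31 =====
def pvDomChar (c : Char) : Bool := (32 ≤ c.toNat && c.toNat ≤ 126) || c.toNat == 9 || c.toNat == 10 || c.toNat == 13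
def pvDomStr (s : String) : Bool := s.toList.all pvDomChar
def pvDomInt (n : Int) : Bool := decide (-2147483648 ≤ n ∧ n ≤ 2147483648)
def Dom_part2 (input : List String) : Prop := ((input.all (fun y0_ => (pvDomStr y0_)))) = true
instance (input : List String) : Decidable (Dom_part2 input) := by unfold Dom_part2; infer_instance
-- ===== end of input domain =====

-- B replaces A's interleaved accumulate-and-early-return nested loop by two passes:
-- build the whole prefix-sum table of floors over the flattened characters, then
-- find the first -1 in that table (falling back to the total character count).

-- ===== PORT A =====
-- inner 'for char in line' loop: returns .inr count on early return, else the updated (floor, count)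
def part2_goChars (floor count : Int) : List Char → (Int × Int) ⊕ Int
  | [] => .inl (floor, count)
  | c :: cs =>
    let count' := count + 1
    let floor' := if c = '(' then floor + 1 else floor - 1
    if floor' = -1 then .inr count' else part2_goChars floor' count' cs

-- outer 'for line in input' loop
def part2_goLines (floor count : Int) : List String → Int
  | [] => count
  | l :: ls =>
    match part2_goChars floor count l.toList with
    | .inr r => r
    | .inl (f, c) => part2_goLines f c ls

def part2 (input : List String) : Int := part2_goLines 0 0 input

-- ===== PORT B =====
-- the 'floors.append(f)' loop: prefix sums of the deltas starting from f
def part2_accum (f : Int) : List Int → List Int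
  | [] => []
  | d :: ds => (f + d) :: part2_accum (f + d) ds

def part2_alt (input : List String) : Int :=
  let chars := (input.map String.toList).flatten
  let floors := part2_accum 0 (chars.map (fun c => if c = '(' then (1 : Int) else -1))
  match PySem.List.index? floors (-1) with
  | some i => (i : Int) + 1
  | none => (chars.length : Int)

-- ===== PRECONDITION & SPEC =====
def Spec_part2 (input : List String) (out : Int) : Prop := out = part2_alt input
instance (input : List String) (out : Int) : Decidable (Spec_part2 input out) := by unfold Spec_part2; infer_instance

-- ===== CLAIM (what is proved, stated in full; the proofs are below) =====
def Claim_equal_part2 : Prop := ∀ (input : List String), Dom_part2 input → Spec_part2 input (part2 input)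

-- ===== LEMMAS AND PROOFS =====

def part2_delta (c : Char) : Int := if c = '(' then 1 else -1

theorem part2_accum_append (f : Int) (xs ys : List Int) :
    part2_accum f (xs ++ ys) = part2_accum f xs ++ part2_accum (f + xs.sum) ys := by
  induction xs generalizing f with
  | nil => simp [part2_accum]
  | cons d ds ih => simp [part2_accum, ih, add_assoc]

-- characterisation of the inner loop by B's table
theorem part2_goChars_eq (cs : List Char) : ∀ (f c : Int),
    part2_goChars f c cs =
      match PySem.List.index? (part2_accum f (cs.map part2_delta)) (-1) with
      | some i => .inr (c + i + 1)
      | none => .inl (f + (cs.map part2_delta).sum, c + cs.length) := by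
  induction cs with
  | nil => intro f c; simp [part2_goChars, part2_accum, PySem.List.index?]
  | cons x xs ih =>
    intro f c
    simp only [List.map_cons, part2_accum, part2_goChars]
    by_cases hx : f + part2_delta x = -1
    · rw [hx, PySem.List.index?_cons_self]
      simp only [part2_delta] at hx
      split_ifs at hx <;> simp_all
    · rw [PySem.List.index?_cons_of_ne _ hx, ih]
      have hfl : (if x = '(' then f + 1 else f - 1) = f + part2_delta x := by
        simp [part2_delta]; split_ifs <;> ring
      rw [hfl]
      have : ¬ (f + part2_delta x = -1) := hx
      simp only [if_neg this]
      cases h : PySem.List.index? (part2_accum (f + part2_delta x) (xs.map part2_delta)) (-1) with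
      | none => simp [List.sum_cons]; constructor <;> [ring_nf; omega]
      | some i => simp [Option.map]; ring

theorem index?_append_not_mem {α : Type} [BEq α] [LawfulBEq α] (l t : List α) (v : α)
    (h : v ∉ l) :
    PySem.List.index? (l ++ t) v = (PySem.List.index? t v).map (· + l.length) := by
  induction l with
  | nil => simp
  | cons x xs ih =>
    have hx : x ≠ v := by intro e; exact h (e ▸ List.mem_cons_self ..)
    rw [List.cons_append, PySem.List.index?_cons_of_ne _ hx,
      ih (fun m => h (List.mem_cons_of_mem _ m))]
    cases PySem.List.index? t v
    · simp
    · simp; omega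

-- characterisation of the outer loop
theorem part2_goLines_eq (ls : List String) : ∀ (f c : Int),
    part2_goLines f c ls =
      match PySem.List.index?
          (part2_accum f (((ls.map String.toList).flatten).map part2_delta)) (-1) with
      | some i => c + i + 1
      | none => c + ((ls.map String.toList).flatten).length := by
  induction ls with
  | nil => intro f c; simp [part2_goLines, part2_accum, PySem.List.index?]
  | cons l ls ih =>
    intro f c
    simp only [List.map_cons, List.flatten_cons, List.map_append, part2_accum_append,
      part2_goLines]
    rw [part2_goChars_eq]
    cases h1 : PySem.List.index? (part2_accum f (l.toList.map part2_delta)) (-1) with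
    | some i =>
      have hmem : (-1 : Int) ∈ part2_accum f (l.toList.map part2_delta) := by
        rw [← PySem.List.index?_isSome_iff, h1]; rfl
      rw [PySem.List.index?_append_of_mem _ hmem, h1]
    | none =>
      simp only []
      rw [ih]
      have hlen : (part2_accum f (l.toList.map part2_delta)).length
          = (l.toList.map part2_delta).length := by
        clear h1; induction (l.toList.map part2_delta) generalizing f with
        | nil => simp [part2_accum]
        | cons d ds ihd => simp [part2_accum, ihd]
      have hnot : (-1 : Int) ∉ part2_accum f (l.toList.map part2_delta) := by
        rw [← PySem.List.index?_isSome_iff, h1]; simp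
      rw [index?_append_not_mem _ _ _ hnot]
      cases PySem.List.index?
          (part2_accum (f + (l.toList.map part2_delta).sum)
            (((ls.map String.toList).flatten).map part2_delta)) (-1) with
      | none => simp [hlen]; ring
      | some i => simp [hlen]; ring


-- ===== VERDICT (by name: the statement is the Claim_ definition above) =====
theorem part2_spec : Claim_equal_part2 := by
  intro input _
  unfold Spec_part2 part2 part2_alt
  rw [part2_goLines_eq]
  have hd : (fun c => if c = '(' then (1 : Int) else -1) = part2_delta := rfl
  rw [hd]
  cases h : List.idxOf? (-1)
      (part2_accum 0 ((input.map (List.map part2_delta ∘ String.toList)).flatten)) with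
  | none => simp [h]
  | some i => simp [h]
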